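-- pv_equiv track=rewrite | github.com/effyhuihui/snake | snake_functions.py | bomb_line
-- ===== SOURCE A (Python) =====
-- def bomb_line(turning_array, tx, ty,hx, hy):
--
--     """
--     :param turning_array:
--     :param snake_tail:
--     :return: sorted lists of coordinates of lines in between of the whole snake~其实return的list是由tuple组成，每个
--     tuple都是一段线段，每个tuple的第一个元素是X坐标，第二个元素是Y坐标~~~
--     """
--     bomb_line = []
--
--     if turning_array == []:
--         bomb_line.append((sorted([tx, hx]), sorted([ty, hy])))
--     else:
--         bomb_line.append((sorted([hx,turning_array[0][0]]),sorted([hy, turning_array[0][1]])))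
--         for i in range(len(turning_array)-1):
--             bomb_line.append((sorted([turning_array[i][0],turning_array[i+1][0]]), sorted([turning_array[i][1], turning_array[i+1][1]])))
--         bomb_line.append((sorted([tx, turning_array[-1][0]]), sorted([ty, turning_array[-1][1]])))
--     return bomb_line
-- ===== SOURCE B (Python) =====
-- def bomb_line(turning_array, tx, ty, hx, hy):
--     def seg(px, py, qx, qy):
--         return ([min(px, qx), max(px, qx)], [min(py, qy), max(py, qy)])
--
--     def go(px, py, pts):
--         if not pts:
--             return [seg(px, py, tx, ty)]
--         qx, qy = pts[0]
--         return [seg(px, py, qx, qy)] + go(qx, qy, pts[1:])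
--
--     return go(hx, hy, turning_array)
-- ===== Notes on version B (the rewrite author's own statement) =====
-- stated objective: alternative
-- what changed: B replaces A's indexed loop with empty-array special case by structural recursion over the turning points carrying the previous point, and replaces sorting each two-element list by direct min/max arithmetic.
import Mathlib
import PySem

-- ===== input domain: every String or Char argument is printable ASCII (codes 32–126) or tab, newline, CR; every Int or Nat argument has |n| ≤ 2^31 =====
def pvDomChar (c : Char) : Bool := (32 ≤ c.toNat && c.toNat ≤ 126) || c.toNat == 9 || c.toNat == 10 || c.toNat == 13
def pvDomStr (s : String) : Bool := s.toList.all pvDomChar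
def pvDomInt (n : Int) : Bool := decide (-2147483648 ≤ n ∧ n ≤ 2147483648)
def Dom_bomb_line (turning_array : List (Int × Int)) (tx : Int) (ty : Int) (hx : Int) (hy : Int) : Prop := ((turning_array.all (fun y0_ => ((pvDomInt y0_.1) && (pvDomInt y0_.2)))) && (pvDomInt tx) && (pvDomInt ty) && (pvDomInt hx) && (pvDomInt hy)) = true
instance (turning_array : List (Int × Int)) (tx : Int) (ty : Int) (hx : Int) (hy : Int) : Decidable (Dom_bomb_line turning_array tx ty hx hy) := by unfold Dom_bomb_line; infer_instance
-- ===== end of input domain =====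

-- B recurses over the turning points carrying the previous point and uses min/max instead
-- of sorting two-element lists (objective: alternative); return values proved equal everywhere.

-- ===== PORT A =====
-- literal transliteration of A: special case for empty turning_array, then head segment,
-- a loop over range(len-1) appending middle segments, and a tail segment
def bomb_line (turning_array : List (Int × Int)) (tx : Int) (ty : Int) (hx : Int) (hy : Int) : List (List Int × List Int) :=
  if turning_array = [] then
    [(PySem.List.sorted [tx, hx] (fun x => x) false, PySem.List.sorted [ty, hy] (fun x => x) false)]
  else
    let bl : List (List Int × List Int) :=
      [(PySem.List.sorted [hx, (PySem.List.pyGetD turning_array 0 (0, 0)).1] (fun x => x) false,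
        PySem.List.sorted [hy, (PySem.List.pyGetD turning_array 0 (0, 0)).2] (fun x => x) false)]
    let bl := (PySem.List.pyRange 0 ((turning_array.length : Int) - 1) 1).foldl
      (fun acc i => acc ++
        [(PySem.List.sorted [(PySem.List.pyGetD turning_array i (0, 0)).1,
                             (PySem.List.pyGetD turning_array (i + 1) (0, 0)).1] (fun x => x) false,
          PySem.List.sorted [(PySem.List.pyGetD turning_array i (0, 0)).2,
                             (PySem.List.pyGetD turning_array (i + 1) (0, 0)).2] (fun x => x) false)]) bl
    bl ++ [(PySem.List.sorted [tx, (PySem.List.pyGetD turning_array (-1) (0, 0)).1] (fun x => x) false,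
            PySem.List.sorted [ty, (PySem.List.pyGetD turning_array (-1) (0, 0)).2] (fun x => x) false)]

-- ===== PORT B =====
-- seg(px, py, qx, qy): a segment from two points via min/max
def pvSeg2 (px py qx qy : Int) : List Int × List Int :=
  ([min px qx, max px qx], [min py qy, max py qy])

-- go(px, py, pts): recursion over the remaining turning points, previous point carried
def pvGo (tx ty : Int) (px py : Int) : List (Int × Int) → List (List Int × List Int)
  | [] => [pvSeg2 px py tx ty]
  | (qx, qy) :: rest => pvSeg2 px py qx qy :: pvGo tx ty qx qy rest

def bomb_line_alt (turning_array : List (Int × Int)) (tx : Int) (ty : Int) (hx : Int) (hy : Int) : List (List Int × List Int) :=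
  pvGo tx ty hx hy turning_array

-- ===== PRECONDITION & SPEC =====
def Spec_bomb_line (turning_array : List (Int × Int)) (tx : Int) (ty : Int) (hx : Int) (hy : Int) (out : List (List Int × List Int)) : Prop := out = bomb_line_alt turning_array tx ty hx hy
instance (turning_array : List (Int × Int)) (tx : Int) (ty : Int) (hx : Int) (hy : Int) (out : List (List Int × List Int)) : Decidable (Spec_bomb_line turning_array tx ty hx hy out) := by unfold Spec_bomb_line; infer_instance

-- ===== CLAIM =====
def Claim_equal_bomb_line : Prop := ∀ (turning_array : List (Int × Int)) (tx : Int) (ty : Int) (hx : Int) (hy : Int), Dom_bomb_line turning_array tx ty hx hy → Spec_bomb_line turning_array tx ty hx hy (bomb_line turning_array tx ty hx hy)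

-- ===== LEMMAS AND PROOFS =====

-- sorting a two-element list is [min, max]
theorem pvSorted_pair (a b : Int) :
    PySem.List.sorted [a, b] (fun x => x) false = [min a b, max a b] := by
  rcases le_total a b with h | h
  · rw [PySem.List.sorted_id_eq_of_perm_of_pairwise (ys := [a, b]) _ (List.Perm.refl _)
        (by simp [h])]
    simp [min_eq_left h, max_eq_right h]
  · rw [PySem.List.sorted_id_eq_of_perm_of_pairwise (ys := [b, a]) _ (List.Perm.swap _ _ _)
        (by simp [h])]
    simp [min_eq_right h, max_eq_left h]

-- A-style segment (sorted pairs) in min/max form; order of the two points is irrelevant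
theorem pvSeg_sorted (p q : Int × Int) :
    (PySem.List.sorted [p.1, q.1] (fun x => x) false,
     PySem.List.sorted [p.2, q.2] (fun x => x) false) = pvSeg2 p.1 p.2 q.1 q.2 := by
  simp [pvSeg2, pvSorted_pair]

theorem pvSeg2_comm (px py qx qy : Int) : pvSeg2 px py qx qy = pvSeg2 qx qy px py := by
  simp [pvSeg2, min_comm, max_comm]

-- B's recursion expressed as the segments of the combined point list, used to align with A
theorem pvGo_append_last (tx ty : Int) (pts : List (Int × Int)) (h : pts ≠ []) (px py : Int) :
    pvGo tx ty px py pts =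
      pvSeg2 px py (pts.getD 0 (0,0)).1 (pts.getD 0 (0,0)).2 ::
      ((List.range (pts.length - 1)).map
        (fun k => pvSeg2 (pts.getD k (0,0)).1 (pts.getD k (0,0)).2
                         (pts.getD (k+1) (0,0)).1 (pts.getD (k+1) (0,0)).2)
      ++ [pvSeg2 (pts.getLast h).1 (pts.getLast h).2 tx ty]) := by
  induction pts generalizing px py with
  | nil => simp at h
  | cons p rest ih =>
    cases rest with
    | nil => simp [pvGo]
    | cons q zs =>
      have := ih (by simp) p.1 p.2
      obtain ⟨px', py'⟩ := p
      obtain ⟨qx', qy'⟩ := q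
      simp only [pvGo] at this ⊢
      rw [this]
      simp [List.range_succ_eq_map, List.map_map, Function.comp, List.getLast_cons]

theorem bomb_line_eq_alt (turning_array : List (Int × Int)) (tx ty hx hy : Int) :
    bomb_line turning_array tx ty hx hy = bomb_line_alt turning_array tx ty hx hy := by
  unfold bomb_line bomb_line_alt
  by_cases hta : turning_array = []
  · subst hta
    simp [pvGo, pvSeg2, pvSorted_pair, min_comm, max_comm]
  · simp only [if_neg hta]
    rw [pvGo_append_last tx ty turning_array hta hx hy]
    rw [PySem.List.foldl_append_singleton_eq_map]
    rw [PySem.List.pyRange_one]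
    cases turning_array with
    | nil => exact absurd rfl hta
    | cons t0 ts =>
      simp only [List.length_cons, List.map_map]
      have hlen : (((ts.length + 1 : Nat) : Int) - 1 - 0).toNat = ts.length := by omega
      rw [hlen]
      simp only [List.cons_append, List.cons.injEq, Nat.add_sub_cancel]
      refine ⟨?_, ?_⟩
      · simpa [PySem.List.pyGetD_zero_cons] using
          pvSeg_sorted (hx, hy) (PySem.List.pyGetD (t0 :: ts) 0 (0, 0))
      · congr 1
        · apply List.map_congr_left
          intro k hk
          simp only [List.mem_range] at hk
          have h1 : (0 : Int) + (k : Int) = ((k : Nat) : Int) := by omega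
          simp only [Function.comp, h1]
          have h2 : ((k : Int) + 1) = ((k + 1 : Nat) : Int) := by push_cast; ring
          simp only [h2, PySem.List.pyGetD_natCast]
          exact pvSeg_sorted ((t0 :: ts).getD k (0,0)) ((t0 :: ts).getD (k+1) (0,0))
        · have hne : (t0 :: ts) ≠ [] := by simp
          rw [PySem.List.pyGetD_neg_one (t0 :: ts) (0, 0) hne]
          rw [show pvSeg2 ((t0 :: ts).getLast hne).1 ((t0 :: ts).getLast hne).2 tx ty
              = pvSeg2 tx ty ((t0 :: ts).getLast hne).1 ((t0 :: ts).getLast hne).2 from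
            pvSeg2_comm _ _ _ _]
          simpa using pvSeg_sorted (tx, ty) ((t0 :: ts).getLast hne)

-- ===== VERDICT =====
theorem bomb_line_spec : Claim_equal_bomb_line := by
  intro ta tx ty hx hy _
  unfold Spec_bomb_line
  exact bomb_line_eq_alt ta tx ty hx hy
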